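-- pv_equiv track=rewrite | github.com/caiogeraldes/l-om | transl/lom.py | hkiast
-- ===== SOURCE A (Python) =====
-- hk_iast_unicode = {'M': 'ṃ', 'H': 'ḥ', 'a': 'a', 'A': 'ā',
--                    'i': 'i', 'I': 'ī', 'u': 'u', 'U': 'ū',
--                    'R': 'ṛ', 'lR': 'ḷ', 'e': 'e', 'o': 'o',
--                    'k': 'k', 'g': 'g', 'G': 'ṅ', 'c': 'c',
--                    'j': 'j', 'J': 'ñ', 'T': 'ṭ', 'D': 'ḍ',
--                    'N': 'ṇ', 't': 't', 'd': 'd', 'n': 'n',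
--                    'p': 'p', 'b': 'b', 'm': 'm', 'y': 'y',
--                    'r': 'r', 'l': 'l', 'v': 'v', 'z': 'ś',
--                    'S': 'ṣ', 's': 's', 'h': 'h', "'": '\'',
--                    ' ': ' ', '|': '\u0964', '||': '\u0964'
--                    }
--
-- def hkiast(input_text):
--
--     """
--     :param input_text: Text to be transliterated, written in Harvard-Kyoto.
--     :return: Text in IAST.
--     """
--
--     if input_text[-1] != ' ':
--         input_text = input_text.center(len(input_text) + 2)
--     output_text = []
--
--     for i in range(len(input_text)):
--         c = input_text[i]
--
--         if c not in hk_iast_unicode.keys():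
--             output_text.append(c)
--             continue
--
--         if c == 'l' and input_text[i + 1] == 'R':
--             output_text.append(hk_iast_unicode['lR'])
--         elif c == 'R' and input_text[i - 1] == 'l':
--             continue
--         else:
--             output_text.append(hk_iast_unicode[c])
--     output_text = ''.join(output_text)
--     output_text = output_text.strip()
--     return output_text
-- ===== SOURCE B (Python) =====
-- hk_iast_unicode = {'M': 'ṃ', 'H': 'ḥ', 'a': 'a', 'A': 'ā',
--                    'i': 'i', 'I': 'ī', 'u': 'u', 'U': 'ū',
--                    'R': 'ṛ', 'lR': 'ḷ', 'e': 'e', 'o': 'o',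
--                    'k': 'k', 'g': 'g', 'G': 'ṅ', 'c': 'c',
--                    'j': 'j', 'J': 'ñ', 'T': 'ṭ', 'D': 'ḍ',
--                    'N': 'ṇ', 't': 't', 'd': 'd', 'n': 'n',
--                    'p': 'p', 'b': 'b', 'm': 'm', 'y': 'y',
--                    'r': 'r', 'l': 'l', 'v': 'v', 'z': 'ś',
--                    'S': 'ṣ', 's': 's', 'h': 'h', "'": '\'',
--                    ' ': ' ', '|': '\u0964', '||': '\u0964'
--                    }
--
--
-- def hkiast(input_text):
--     """Harvard-Kyoto -> IAST: split on 'lR', translate each piece, join with 'ḷ' (no padding, no index loop)."""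
--     pieces = input_text.split('lR')
--     translated = (''.join(hk_iast_unicode.get(c, c) for c in piece) for piece in pieces)
--     return hk_iast_unicode['lR'].join(translated).strip()
-- ===== Notes on version B (the rewrite author's own statement) =====
-- stated objective: idiomatic
-- what changed: Replaced the pad-with-spaces + index-based lookahead/lookbehind-and-continue loop by split on the two-character digraph / per-character table translation of each piece / join with its IAST value, then strip; no padding, no index arithmetic.
import Mathlib
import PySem

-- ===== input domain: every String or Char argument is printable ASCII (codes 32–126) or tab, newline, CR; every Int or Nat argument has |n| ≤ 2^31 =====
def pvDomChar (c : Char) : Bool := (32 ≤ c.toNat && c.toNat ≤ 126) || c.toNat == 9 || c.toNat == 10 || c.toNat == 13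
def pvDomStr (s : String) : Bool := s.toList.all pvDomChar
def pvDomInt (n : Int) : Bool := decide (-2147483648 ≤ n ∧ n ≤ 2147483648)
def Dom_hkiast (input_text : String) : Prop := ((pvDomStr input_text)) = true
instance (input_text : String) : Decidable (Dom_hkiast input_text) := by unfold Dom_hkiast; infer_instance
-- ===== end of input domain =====

-- B replaces A's space-padding + index lookahead/lookbehind loop by split-on-'lR' / translate / join (objective: idiomatic).

-- ===== PORT A =====
-- the module-level dict hk_iast_unicode, restricted to its single-character keys
-- (the two-character key 'lR' is only ever read by the explicit 'lR' branches of the code,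
--  which carry its value 'ḷ' directly; membership 'c in hk_iast_unicode.keys()' of a
--  single character c is exactly (hkMap c).isSome)
def hkMap : Char → Option Char
  | 'M' => some 'ṃ' | 'H' => some 'ḥ' | 'a' => some 'a' | 'A' => some 'ā'
  | 'i' => some 'i' | 'I' => some 'ī' | 'u' => some 'u' | 'U' => some 'ū'
  | 'R' => some 'ṛ' | 'e' => some 'e' | 'o' => some 'o'
  | 'k' => some 'k' | 'g' => some 'g' | 'G' => some 'ṅ' | 'c' => some 'c'
  | 'j' => some 'j' | 'J' => some 'ñ' | 'T' => some 'ṭ' | 'D' => some 'ḍ'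
  | 'N' => some 'ṇ' | 't' => some 't' | 'd' => some 'd' | 'n' => some 'n'
  | 'p' => some 'p' | 'b' => some 'b' | 'm' => some 'm' | 'y' => some 'y'
  | 'r' => some 'r' | 'l' => some 'l' | 'v' => some 'v' | 'z' => some 'ś'
  | 'S' => some 'ṣ' | 's' => some 's' | 'h' => some 'h' | '\'' => some '\''
  | ' ' => some ' ' | '|' => some '।'
  | _ => none

-- A's index loop, as structural recursion carrying prev = input_text[i-1];
-- input_text[i+1] is rest.head? (Python raises only when 'l' is the last character,
-- which the padding rules out on every input Pre_ admits).
def hkAuxA (prev : Char) : List Char → List Char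
  | [] => []
  | c :: rest =>
    if (hkMap c).isNone then c :: hkAuxA c rest                       -- c not in keys → append raw
    else if c = 'l' ∧ rest.head? = some 'R' then 'ḷ' :: hkAuxA c rest -- hk_iast_unicode['lR']
    else if c = 'R' ∧ prev = 'l' then hkAuxA c rest                   -- continue
    else ((hkMap c).getD c) :: hkAuxA c rest                          -- hk_iast_unicode[c]

-- input_text[-1] (IndexError on "" is excluded by Pre_; the getD default is unreachable there);
-- center(len+2) adds exactly one space on each side
def hkPad (l : List Char) : List Char :=
  if (PySem.List.pyGet? l (-1)).getD ' ' ≠ ' ' then ' ' :: l ++ [' '] else l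

def hkiast (input_text : String) : String :=
  String.ofList (PySem.Chars.strip
    (hkAuxA ((PySem.List.pyGet? (hkPad input_text.toList) (-1)).getD ' ') (hkPad input_text.toList)))

-- ===== PORT B =====
-- the same dict as an association list over its single-character keys ('lR' and the
-- duplicate '||' can never match the one-character argument of .get and are omitted);
-- hk_iast_unicode.get(c, c) is hkGetD c
def hkTable : List (Char × Char) :=
  [('M', 'ṃ'), ('H', 'ḥ'), ('a', 'a'), ('A', 'ā'),
   ('i', 'i'), ('I', 'ī'), ('u', 'u'), ('U', 'ū'),
   ('R', 'ṛ'), ('e', 'e'), ('o', 'o'),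
   ('k', 'k'), ('g', 'g'), ('G', 'ṅ'), ('c', 'c'),
   ('j', 'j'), ('J', 'ñ'), ('T', 'ṭ'), ('D', 'ḍ'),
   ('N', 'ṇ'), ('t', 't'), ('d', 'd'), ('n', 'n'),
   ('p', 'p'), ('b', 'b'), ('m', 'm'), ('y', 'y'),
   ('r', 'r'), ('l', 'l'), ('v', 'v'), ('z', 'ś'),
   ('S', 'ṣ'), ('s', 's'), ('h', 'h'), ('\'', '\''),
   (' ', ' '), ('|', '।')]

def hkGetD (c : Char) : Char := ((PySem.Dict.mk hkTable).getD c c)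

-- input_text.split('lR'): leftmost non-overlapping occurrences, ported by hand
-- (exact: str.split scans left to right for the next occurrence of the separator)
def splitLR : List Char → List (List Char)
  | 'l' :: 'R' :: rest => [] :: splitLR rest
  | c :: rest =>
    match splitLR rest with
    | p :: ps => (c :: p) :: ps
    | [] => [[c]]          -- unreachable: splitLR never returns []
  | [] => [[]]

-- 'ḷ'.join(pieces), ported by hand (exact: interleaves the separator)
def joinLR : List (List Char) → List Char
  | [] => []
  | [p] => p
  | p :: ps => p ++ 'ḷ' :: joinLR ps

def hkiast_alt (input_text : String) : String :=
  String.ofList (PySem.Chars.strip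
    (joinLR ((splitLR input_text.toList).map (List.map hkGetD))))

-- ===== PRECONDITION & SPEC =====
-- Pre_ excludes only the empty string, on which the Python A raises IndexError at input_text[-1].
def Pre_hkiast (input_text : String) : Prop := input_text ≠ ""
instance (input_text : String) : Decidable (Pre_hkiast input_text) := by unfold Pre_hkiast; infer_instance
def pvWitness_hkiast : String := "lRk "

def Spec_hkiast (input_text : String) (out : String) : Prop := out = hkiast_alt input_text
instance (input_text : String) (out : String) : Decidable (Spec_hkiast input_text out) := by unfold Spec_hkiast; infer_instance

-- ===== CLAIM (what is proved, stated in full; the proofs are below) =====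
def Claim_equal_hkiast : Prop := ∀ (input_text : String), Dom_hkiast input_text → Pre_hkiast input_text → Spec_hkiast input_text (hkiast input_text)

-- ===== LEMMAS AND PROOFS =====

-- proof-only middle man: a maximal-munch scan, bridged to A's loop on one side
-- and to B's split/translate/join on the other
def hkAuxB : List Char → List Char
  | 'l' :: 'R' :: rest => 'ḷ' :: hkAuxB rest
  | c :: rest => (hkGetD c) :: hkAuxB rest
  | [] => []

set_option maxRecDepth 20000 in
set_option maxHeartbeats 1000000 in
theorem hkGetD_eq (c : Char) : hkGetD c = (hkMap c).getD c := by
  unfold hkGetD hkMap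
  split
  all_goals try decide
  have hfind : List.find? (fun p => p.1 == c) hkTable = none := by
    rw [List.find?_eq_none]
    intro x hx
    simp only [hkTable, List.mem_cons, List.not_mem_nil, or_false] at hx
    rcases hx with h|h|h|h|h|h|h|h|h|h|h|h|h|h|h|h|h|h|h|h|h|h|h|h|h|h|h|h|h|h|h|h|h|h|h|h|h <;>
      (subst h; simp only [beq_iff_eq]; intro hb; exact absurd hb.symm (by assumption))
  simp only [PySem.Dict.getD, PySem.Dict.get?, hfind, Option.map_none, Option.getD_none]

-- B's munch on a generic cons that is not the 'lR' pattern
theorem hkAuxB_cons (c : Char) (rest : List Char)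
    (h : ∀ t, c = 'l' → rest = 'R' :: t → False) :
    hkAuxB (c :: rest) = (hkGetD c) :: hkAuxB rest := by
  rw [hkAuxB.eq_def]
  split
  · rename_i t heq
    injection heq with h1 h2
    exact (h t h1 h2).elim
  · rename_i c' rest' heq
    injection heq with h1 h2
    subst h1; subst h2; rfl
  · rename_i heq; cases heq

-- core: A's prev-carrying index scan equals the munch whenever the
-- pending skip case (prev = 'l' with an 'R' coming up) is impossible
theorem hkAuxA_eq_hkAuxB (l : List Char) : ∀ prev : Char,
    ¬ (prev = 'l' ∧ l.head? = some 'R') → hkAuxA prev l = hkAuxB l := by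
  fun_induction hkAuxB l with
  | case1 rest ih =>
    intro prev _
    have e1 : hkAuxA prev ('l' :: 'R' :: rest) = 'ḷ' :: hkAuxA 'l' ('R' :: rest) := rfl
    have e2 : hkAuxA 'l' ('R' :: rest) = hkAuxA 'R' rest := rfl
    rw [e1, e2, ih 'R' (by simp)]
  | case2 c rest h ih =>
    intro prev hprev
    have hnot2 : ¬ (c = 'l' ∧ rest.head? = some 'R') := by
      rintro ⟨hc, hh⟩
      cases rest with
      | nil => simp at hh
      | cons d rs => simp at hh; exact h rs hc (by rw [hh])
    by_cases hkey : (hkMap c).isNone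
    · have hcl : c ≠ 'l' := by
        intro hc; subst hc; simp [hkMap] at hkey
      rw [Option.isNone_iff_eq_none] at hkey
      show (if (hkMap c).isNone then c :: hkAuxA c rest
            else if c = 'l' ∧ rest.head? = some 'R' then 'ḷ' :: hkAuxA c rest
            else if c = 'R' ∧ prev = 'l' then hkAuxA c rest
            else ((hkMap c).getD c) :: hkAuxA c rest) = _
      rw [hkey]
      simp only [Option.isNone_none, if_pos, Option.getD_none]
      rw [ih c hnot2, hkGetD_eq, hkey, Option.getD_none]
    · have hnot3 : ¬ (c = 'R' ∧ prev = 'l') := by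
        rintro ⟨hc, hp⟩
        subst hc; exact hprev ⟨hp, rfl⟩
      show (if (hkMap c).isNone then c :: hkAuxA c rest
            else if c = 'l' ∧ rest.head? = some 'R' then 'ḷ' :: hkAuxA c rest
            else if c = 'R' ∧ prev = 'l' then hkAuxA c rest
            else ((hkMap c).getD c) :: hkAuxA c rest) = _
      rw [if_neg (by simpa using hkey), if_neg hnot2, if_neg hnot3, ih c hnot2, hkGetD_eq]
  | case3 => intro _ _; rfl

-- splitLR never returns the empty list of pieces
theorem splitLR_ne_nil (l : List Char) : splitLR l ≠ [] := by
  fun_induction splitLR l <;> simp_all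

-- B's split/translate/join equals the munch
theorem joinLR_map_splitLR (l : List Char) :
    joinLR ((splitLR l).map (List.map hkGetD)) = hkAuxB l := by
  have hj : ∀ (a : Char) (x : List Char) (ys : List (List Char)),
      joinLR ((a :: x) :: ys) = a :: joinLR (x :: ys) := by
    intro a x ys; cases ys <;> rfl
  fun_induction splitLR l with
  | case1 rest ih =>
    show joinLR ([] :: (splitLR rest).map (List.map hkGetD)) = 'ḷ' :: hkAuxB rest
    rcases hs : (splitLR rest).map (List.map hkGetD) with _ | ⟨p, ps⟩
    · exact absurd (List.map_eq_nil_iff.mp hs) (splitLR_ne_nil rest)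
    · show ([] : List Char) ++ 'ḷ' :: joinLR (p :: ps) = 'ḷ' :: hkAuxB rest
      rw [List.nil_append, ← hs, ih]
  | case2 c rest h p ps heq ih =>
    rw [heq, List.map_cons] at ih
    show joinLR ((c :: p).map hkGetD :: ps.map (List.map hkGetD)) = hkAuxB (c :: rest)
    rw [List.map_cons, hj, hkAuxB_cons c rest h, ih]
  | case3 c rest h heq ih =>
    exact absurd heq (splitLR_ne_nil rest)
  | case4 => rfl

-- appending the pad space only appends a space to the munch output
theorem hkAuxB_append_space (l : List Char) : hkAuxB (l ++ [' ']) = hkAuxB l ++ [' '] := by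
  fun_induction hkAuxB l with
  | case1 rest ih =>
    show hkAuxB ('l' :: 'R' :: (rest ++ [' '])) = 'ḷ' :: hkAuxB rest ++ [' ']
    rw [show hkAuxB ('l' :: 'R' :: (rest ++ [' '])) = 'ḷ' :: hkAuxB (rest ++ [' ']) from rfl, ih,
        List.cons_append]
  | case2 c rest h ih =>
    show hkAuxB (c :: (rest ++ [' '])) = (hkGetD c) :: hkAuxB rest ++ [' ']
    have hcond : ∀ t, c = 'l' → rest ++ [' '] = 'R' :: t → False := by
      intro t hc htail
      cases rest with
      | nil => simp at htail
      | cons d rs =>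
        simp only [List.cons_append] at htail
        injection htail with h1 h2
        exact h rs hc (by rw [h1])
    rw [hkAuxB_cons c (rest ++ [' ']) hcond, ih, List.cons_append]
  | case3 =>
    show hkAuxB [' '] = [' ']
    rfl

-- the leading pad space maps to a space
theorem hkAuxB_cons_space (l : List Char) : hkAuxB (' ' :: l) = ' ' :: hkAuxB l := by
  rw [hkAuxB_cons ' ' l (by intro t hc _; cases hc)]; rfl

-- stripping removes the two pad spaces
theorem strip_pad (x : List Char) : PySem.Chars.strip (' ' :: (x ++ [' '])) = PySem.Chars.strip x := by
  have hl : PySem.Chars.lstrip (' ' :: (x ++ [' '])) = PySem.Chars.lstrip (x ++ [' ']) := by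
    simp [PySem.Chars.lstrip, List.dropWhile, PySem.Chars.isspace]
  have hr : ∀ z : List Char, PySem.Chars.rstrip (z ++ [' ']) = PySem.Chars.rstrip z := by
    intro z
    simp [PySem.Chars.rstrip, PySem.Chars.isspace]
  rw [PySem.Chars.strip, PySem.Chars.strip, hl, PySem.Chars.lstrip, List.dropWhile_append]
  split
  · rename_i he
    rw [List.isEmpty_iff] at he
    rw [PySem.Chars.lstrip, he]
    simp [List.dropWhile, PySem.Chars.rstrip, PySem.Chars.isspace]
  · rw [hr, PySem.Chars.lstrip]

theorem pyGet_last_space (l : List Char) : PySem.List.pyGet? (l ++ [' ']) (-1) = some ' ' := by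
  simp [PySem.List.pyGet?, PySem.List.pyIdx?]

-- ===== VERDICT (by name: the statement is the Claim_ definition above) =====
theorem hkiast_spec : Claim_equal_hkiast := by
  intro s _ _
  unfold Spec_hkiast hkiast hkiast_alt hkPad
  rw [joinLR_map_splitLR]
  by_cases hpad : (PySem.List.pyGet? s.toList (-1)).getD ' ' ≠ ' '
  · rw [if_pos hpad]
    have hprev : (PySem.List.pyGet? (' ' :: s.toList ++ [' ']) (-1)).getD ' ' = ' ' := by
      rw [show (' ' :: s.toList ++ [' ']) = (' ' :: s.toList) ++ [' '] from rfl, pyGet_last_space]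
      rfl
    rw [hprev, hkAuxA_eq_hkAuxB _ ' ' (by simp)]
    rw [show (' ' :: s.toList ++ [' ']) = ' ' :: (s.toList ++ [' ']) from rfl,
        hkAuxB_cons_space, hkAuxB_append_space]
    rw [strip_pad]
  · rw [if_neg hpad]
    push Not at hpad
    rw [hpad, hkAuxA_eq_hkAuxB _ ' ' (by simp)]
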